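-- pv_equiv track=rewrite | github.com/ericfzhu/advent-23 | 3/solution.py | calculate_gear_ratios_refined
-- ===== SOURCE A (Python) =====
-- def calculate_gear_ratios_refined(grid):
--     # Function to find horizontally adjacent numbers around a cell
--     def find_adjacent_numbers(x, y):
--         numbers = []
--         for dx in [-1, 0, 1]:
--             nx = x + dx
--             if 0 <= nx < len(grid):
--                 row = grid[nx]
--                 for dy in [-1, 0, 1]:
--                     if dx == 0 and dy == 0:
--                         continue
--                     ny = y + dy
--                     if 0 <= ny < len(row) and row[ny].isdigit():
--                         # Extract the complete number
--                         start = ny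
--                         while start > 0 and row[start - 1].isdigit():
--                             start -= 1
--                         end = ny
--                         while end + 1 < len(row) and row[end + 1].isdigit():
--                             end += 1
--                         # Add the number if it is not already in the list
--                         number = int(row[start:end+1])
--                         if number not in numbers:
--                             numbers.append(number)
--         return numbers
--
--     total = 0
--     for i in range(len(grid)):
--         for j in range(len(grid[i])):
--             if grid[i][j] == '*':
--                 # Find horizontally adjacent numbers
--                 adjacent_numbers = find_adjacent_numbers(i, j)
--                 # If exactly two numbers, multiply them and add to total
--                 if len(adjacent_numbers) == 2:
--                     total += adjacent_numbers[0] * adjacent_numbers[1]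
--
--     return total
-- ===== SOURCE B (Python) =====
-- def calculate_gear_ratios_refined(grid):
--     # Parse every row once into maximal digit runs (start, end, value),
--     # then resolve each '*' against the run index of its three rows.
--     runs = []
--     for row in grid:
--         row_runs = []
--         c = 0
--         n = len(row)
--         while c < n:
--             if row[c].isdigit():
--                 s = c
--                 while c < n and row[c].isdigit():
--                     c += 1
--                 row_runs.append((s, c - 1, int(row[s:c])))
--             else:
--                 c += 1
--         runs.append(row_runs)
--
--     total = 0
--     for i in range(len(grid)):
--         for j in range(len(grid[i])):
--             if grid[i][j] == '*':
--                 vals = []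
--                 for r in range(max(i - 1, 0), min(i + 2, len(grid))):
--                     for (s, e, v) in runs[r]:
--                         if s <= j + 1 and j - 1 <= e and v not in vals:
--                             vals.append(v)
--                 if len(vals) == 2:
--                     total += vals[0] * vals[1]
--     return total
-- ===== Notes on version B (the rewrite author's own statement) =====
-- stated objective: alternative
-- what changed: A rescans the 3x3 neighbourhood of every '*' and re-extracts the full number from each digit neighbour with per-cell while-loops; B parses each row once into maximal digit runs (start, end, value) and resolves each star by interval intersection against that precomputed run index, deduplicating values exactly as A does.
import Mathlib
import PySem

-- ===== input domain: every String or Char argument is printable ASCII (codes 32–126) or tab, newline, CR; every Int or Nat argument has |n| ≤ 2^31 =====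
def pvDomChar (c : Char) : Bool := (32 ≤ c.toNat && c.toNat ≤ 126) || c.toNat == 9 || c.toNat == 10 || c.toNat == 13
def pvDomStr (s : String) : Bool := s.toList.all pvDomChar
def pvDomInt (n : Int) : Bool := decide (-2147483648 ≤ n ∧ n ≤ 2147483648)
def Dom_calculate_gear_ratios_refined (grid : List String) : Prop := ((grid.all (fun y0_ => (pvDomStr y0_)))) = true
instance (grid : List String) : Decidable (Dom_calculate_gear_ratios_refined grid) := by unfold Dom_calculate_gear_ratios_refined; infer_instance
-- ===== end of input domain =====

-- B replaces A's per-star 3x3 neighbour scan with per-cell while-loop number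
-- extraction by a single parse of each row into maximal digit runs, resolved per
-- star by interval intersection (objective: alternative decomposition).

-- int(s) on a string of digits; here the argument is always a nonempty run of
-- ASCII digits, where PySem.Int.ofChars? is `some`, so the default is never used.
def pvIntOf (cs : List Char) : Int := (PySem.Int.ofChars? cs).getD 0

-- ===== PORT A =====
-- while start > 0 and row[start - 1].isdigit(): start -= 1
def pvExtLeft (row : List Char) : Nat → Nat
  | 0 => 0
  | s + 1 => if PySem.Chars.isdigit (row.getD s ' ') then pvExtLeft row s else s + 1

-- while end + 1 < len(row) and row[end + 1].isdigit(): end += 1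
def pvExtRight (row : List Char) (e : Nat) : Nat :=
  if h : e + 1 < row.length ∧ PySem.Chars.isdigit (row.getD (e + 1) ' ') then
    pvExtRight row (e + 1)
  else e
termination_by row.length - e

-- find_adjacent_numbers(x, y); indices guarded `0 <= nx < len` before use, so
-- `.toNat` under the guard is exact.
def pvFindAdjacent (g : List (List Char)) (x y : Int) : List Int :=
  ([-1, 0, 1] : List Int).foldl (fun numbers dx =>
    let nx := x + dx
    if 0 ≤ nx ∧ nx < (g.length : Int) then
      let row := PySem.List.pyGetD g nx []
      ([-1, 0, 1] : List Int).foldl (fun numbers dy =>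
        if dx = 0 ∧ dy = 0 then numbers
        else
          let ny := y + dy
          if 0 ≤ ny ∧ ny < (row.length : Int) ∧ PySem.Chars.isdigit (PySem.List.pyGetD row ny ' ') then
            let start := pvExtLeft row ny.toNat
            let e := pvExtRight row ny.toNat
            -- number = int(row[start:end+1])
            let number := pvIntOf (PySem.List.slice row (some (start : Int)) (some ((e : Int) + 1)))
            if number ∈ numbers then numbers else numbers ++ [number]
          else numbers) numbers
    else numbers) []

def calculate_gear_ratios_refined (grid : List String) : Int :=
  let g := grid.map String.toList
  (PySem.List.pyRange 0 (g.length : Int) 1).foldl (fun total i =>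
    let row := PySem.List.pyGetD g i []
    (PySem.List.pyRange 0 (row.length : Int) 1).foldl (fun total j =>
      if PySem.List.pyGetD row j ' ' = '*' then
        let adjacent := pvFindAdjacent g i j
        if adjacent.length = 2 then
          total + PySem.List.pyGetD adjacent 0 0 * PySem.List.pyGetD adjacent 1 0
        else total
      else total) total) 0

-- ===== PORT B =====
-- inner `while c < n and row[c].isdigit(): c += 1`
def pvRunEnd (row : List Char) (c : Nat) : Nat :=
  if h : c < row.length ∧ PySem.Chars.isdigit (row.getD c ' ') then pvRunEnd row (c + 1) else c
termination_by row.length - c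

theorem pvRunEnd_ge (row : List Char) (c : Nat) : c ≤ pvRunEnd row c := by
  fun_induction pvRunEnd row c with
  | case1 c h ih => omega
  | case2 c h => omega

-- outer `while c < n:` of the row parser
def pvScanRuns (row : List Char) (c : Nat) : List (Nat × Nat × Int) :=
  if h : c < row.length then
    if hd : PySem.Chars.isdigit (row.getD c ' ') then
      let c' := pvRunEnd row c
      (c, c' - 1, pvIntOf (PySem.List.slice row (some (c : Int)) (some (c' : Int)))) ::
        pvScanRuns row c'
    else pvScanRuns row (c + 1)
  else []
termination_by row.length - c
decreasing_by
  · have h1 : c + 1 ≤ pvRunEnd row (c + 1) := pvRunEnd_ge row (c + 1)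
    have h2 : pvRunEnd row c = pvRunEnd row (c + 1) := by rw [pvRunEnd, dif_pos ⟨h, hd⟩]
    omega
  · omega

def calculate_gear_ratios_refined_alt (grid : List String) : Int :=
  let g := grid.map String.toList
  let runs := g.map (fun row => pvScanRuns row 0)
  (PySem.List.pyRange 0 (g.length : Int) 1).foldl (fun total i =>
    let row := PySem.List.pyGetD g i []
    (PySem.List.pyRange 0 (row.length : Int) 1).foldl (fun total j =>
      if PySem.List.pyGetD row j ' ' = '*' then
        let vals := (PySem.List.pyRange (max (i - 1) 0) (min (i + 2) (g.length : Int)) 1).foldl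
          (fun vals r =>
            (PySem.List.pyGetD runs r []).foldl (fun vals sev =>
              if (sev.1 : Int) ≤ j + 1 ∧ j - 1 ≤ (sev.2.1 : Int) ∧ sev.2.2 ∉ vals then
                vals ++ [sev.2.2]
              else vals) vals) []
        if vals.length = 2 then
          total + PySem.List.pyGetD vals 0 0 * PySem.List.pyGetD vals 1 0
        else total
      else total) total) 0

-- ===== PRECONDITION & SPEC =====
def Spec_calculate_gear_ratios_refined (grid : List String) (out : Int) : Prop := out = calculate_gear_ratios_refined_alt grid
instance (grid : List String) (out : Int) : Decidable (Spec_calculate_gear_ratios_refined grid out) := by unfold Spec_calculate_gear_ratios_refined; infer_instance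

-- ===== CLAIM (what is proved, stated in full; the proofs are below) =====
def Claim_equal_calculate_gear_ratios_refined : Prop := ∀ (grid : List String), Dom_calculate_gear_ratios_refined grid → Spec_calculate_gear_ratios_refined grid (calculate_gear_ratios_refined grid)

-- ===== LEMMAS AND PROOFS =====

-- a maximal digit run of a row
def IsRun (row : List Char) (s e : Nat) : Prop :=
  s ≤ e ∧ e < row.length ∧
  (∀ k, s ≤ k → k ≤ e → PySem.Chars.isdigit (row.getD k ' ') = true) ∧
  (s = 0 ∨ PySem.Chars.isdigit (row.getD (s - 1) ' ') = false) ∧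
  (e + 1 = row.length ∨ PySem.Chars.isdigit (row.getD (e + 1) ' ') = false)

theorem run_unique {row : List Char} {s e s' e' k : Nat}
    (h1 : IsRun row s e) (h2 : IsRun row s' e')
    (hk1 : s ≤ k) (hk2 : k ≤ e) (hk3 : s' ≤ k) (hk4 : k ≤ e') : s = s' ∧ e = e' := by
  obtain ⟨hse, hel, hdig, hls, hrs⟩ := h1
  obtain ⟨hse', hel', hdig', hls', hrs'⟩ := h2
  constructor
  · rcases Nat.lt_trichotomy s s' with h | h | h
    · exfalso
      have hd := hdig (s' - 1) (by omega) (by omega)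
      rcases hls' with h0 | hnd
      · omega
      · rw [hd] at hnd; exact Bool.noConfusion hnd
    · exact h
    · exfalso
      have hd := hdig' (s - 1) (by omega) (by omega)
      rcases hls with h0 | hnd
      · omega
      · rw [hd] at hnd; exact Bool.noConfusion hnd
  · rcases Nat.lt_trichotomy e e' with h | h | h
    · exfalso
      have hd := hdig' (e + 1) (by omega) (by omega)
      rcases hrs with h0 | hnd
      · omega
      · rw [hd] at hnd; exact Bool.noConfusion hnd
    · exact h
    · exfalso
      have hd := hdig (e' + 1) (by omega) (by omega)
      rcases hrs' with h0 | hnd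
      · omega
      · rw [hd] at hnd; exact Bool.noConfusion hnd

theorem pvExtLeft_le (row : List Char) (ny : Nat) : pvExtLeft row ny ≤ ny := by
  induction ny with
  | zero => simp [pvExtLeft]
  | succ s ih =>
    rw [pvExtLeft]
    split_ifs with h
    · omega
    · omega

theorem pvExtLeft_digits (row : List Char) (ny : Nat)
    (hd : PySem.Chars.isdigit (row.getD ny ' ') = true) :
    ∀ k, pvExtLeft row ny ≤ k → k ≤ ny → PySem.Chars.isdigit (row.getD k ' ') = true := by
  induction ny with
  | zero =>
    intro k h1 h2
    have : k = 0 := by omega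
    subst this; exact hd
  | succ s ih =>
    intro k h1 h2
    rw [pvExtLeft] at h1
    split_ifs at h1 with h
    · rcases Nat.lt_or_ge k (s + 1) with hk | hk
      · exact ih h k h1 (by omega)
      · have : k = s + 1 := by omega
        subst this; exact hd
    · have : k = s + 1 := by omega
      subst this; exact hd

theorem pvExtLeft_max (row : List Char) (ny : Nat) :
    pvExtLeft row ny = 0 ∨ PySem.Chars.isdigit (row.getD (pvExtLeft row ny - 1) ' ') = false := by
  induction ny with
  | zero => left; simp [pvExtLeft]
  | succ s ih =>
    rw [pvExtLeft]
    split_ifs with h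
    · exact ih
    · right; simpa using h

theorem pvExtRight_ge (row : List Char) (e : Nat) : e ≤ pvExtRight row e := by
  fun_induction pvExtRight row e with
  | case1 e h ih => omega
  | case2 e h => omega

theorem pvExtRight_lt (row : List Char) (e : Nat) (h : e < row.length) :
    pvExtRight row e < row.length := by
  fun_induction pvExtRight row e with
  | case1 e h' ih => exact ih h'.1
  | case2 e h' => exact h

theorem pvExtRight_digits (row : List Char) (e : Nat)
    (hd : PySem.Chars.isdigit (row.getD e ' ') = true) :
    ∀ k, e ≤ k → k ≤ pvExtRight row e → PySem.Chars.isdigit (row.getD k ' ') = true := by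
  fun_induction pvExtRight row e with
  | case1 e h' ih =>
    intro k h1 h2
    rcases Nat.lt_or_ge e k with hk | hk
    · exact ih h'.2 k (by omega) h2
    · have : k = e := by omega
      subst this; exact hd
  | case2 e h' =>
    intro k h1 h2
    have : k = e := by omega
    subst this; exact hd

theorem pvExtRight_max (row : List Char) (e : Nat) :
    pvExtRight row e + 1 = row.length ∨
      PySem.Chars.isdigit (row.getD (pvExtRight row e + 1) ' ') = false := by
  fun_induction pvExtRight row e with
  | case1 e h' ih => exact ih
  | case2 e h' =>
    rw [Classical.not_and_iff_not_or_not] at h'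
    rcases h' with h' | h'
    · rcases Nat.lt_or_ge (e + 1) row.length with hk | hk
      · omega
      · rcases Nat.eq_or_lt_of_le hk with hk | hk
        · left; omega
        · right; rw [List.getD_eq_default _ _ (by omega)]; decide
    · right; simpa using h'

theorem ext_isRun (row : List Char) (ny : Nat) (h : ny < row.length)
    (hd : PySem.Chars.isdigit (row.getD ny ' ') = true) :
    IsRun row (pvExtLeft row ny) (pvExtRight row ny) ∧
      pvExtLeft row ny ≤ ny ∧ ny ≤ pvExtRight row ny := by
  have hle := pvExtLeft_le row ny
  have hge := pvExtRight_ge row ny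
  refine ⟨⟨by omega, pvExtRight_lt row ny h, ?_, pvExtLeft_max row ny, pvExtRight_max row ny⟩,
    hle, hge⟩
  intro k h1 h2
  rcases Nat.lt_or_ge ny k with hk | hk
  · exact pvExtRight_digits row ny hd k (by omega) h2
  · exact pvExtLeft_digits row ny hd k h1 hk

theorem pvRunEnd_le (row : List Char) (c : Nat) (h : c ≤ row.length) :
    pvRunEnd row c ≤ row.length := by
  fun_induction pvRunEnd row c with
  | case1 c h' ih => exact ih (by omega)
  | case2 c h' => exact h

theorem pvRunEnd_digits (row : List Char) (c : Nat) :
    ∀ k, c ≤ k → k < pvRunEnd row c → PySem.Chars.isdigit (row.getD k ' ') = true := by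
  fun_induction pvRunEnd row c with
  | case1 c h' ih =>
    intro k h1 h2
    rcases Nat.lt_or_ge c k with hk | hk
    · exact ih k (by omega) h2
    · have : k = c := by omega
      subst this; exact h'.2
  | case2 c h' =>
    intro k h1 h2
    omega

theorem pvRunEnd_max (row : List Char) (c : Nat) (h : c ≤ row.length) :
    pvRunEnd row c = row.length ∨
      PySem.Chars.isdigit (row.getD (pvRunEnd row c) ' ') = false := by
  fun_induction pvRunEnd row c with
  | case1 c h' ih => exact ih (by omega)
  | case2 c h' =>
    rw [Classical.not_and_iff_not_or_not] at h'
    rcases h' with h' | h'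
    · left; omega
    · right; simpa using h'

theorem scan_cons (row : List Char) (c : Nat) (hc : c < row.length)
    (hd : PySem.Chars.isdigit (row.getD c ' ') = true) :
    pvScanRuns row c =
      (c, pvRunEnd row c - 1,
        pvIntOf (PySem.List.slice row (some (c : Int)) (some (pvRunEnd row c : Int)))) ::
        pvScanRuns row (pvRunEnd row c) := by
  rw [pvScanRuns, dif_pos hc, dif_pos hd]

theorem scan_out (row : List Char) (c : Nat) (hc : ¬ c < row.length) (s e : Nat) (v : Int) :
    (s, e, v) ∈ pvScanRuns row c ↔
      IsRun row s e ∧ c ≤ s ∧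
        v = pvIntOf (PySem.List.slice row (some (s : Int)) (some ((e : Int) + 1))) := by
  rw [pvScanRuns, dif_neg hc]
  simp only [List.not_mem_nil, false_iff]
  rintro ⟨⟨hse, hel, _⟩, hcs, _⟩
  omega

-- membership characterisation of the row parser
theorem scan_mem (row : List Char) (c : Nat)
    (hpre : ∀ s e, IsRun row s e → s < c → e < c) (s e : Nat) (v : Int) :
    (s, e, v) ∈ pvScanRuns row c ↔
      IsRun row s e ∧ c ≤ s ∧
        v = pvIntOf (PySem.List.slice row (some (s : Int)) (some ((e : Int) + 1))) := by
  suffices H : ∀ n c, row.length - c ≤ n → (∀ s e, IsRun row s e → s < c → e < c) →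
      ∀ s e v, ((s, e, v) ∈ pvScanRuns row c ↔
        IsRun row s e ∧ c ≤ s ∧
          v = pvIntOf (PySem.List.slice row (some (s : Int)) (some ((e : Int) + 1)))) from
    H row.length c (by omega) hpre s e v
  intro n
  induction n with
  | zero =>
    intro c hn hpre s e v
    exact scan_out row c (by omega) s e v
  | succ n ih =>
    intro c hn hpre s e v
    by_cases hc : c < row.length
    · by_cases hd : PySem.Chars.isdigit (row.getD c ' ') = true
      · rw [scan_cons row c hc hd]
        have hgt : c + 1 ≤ pvRunEnd row c := by
          rw [pvRunEnd, dif_pos ⟨hc, hd⟩]; exact pvRunEnd_ge row (c + 1)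
        set c' := pvRunEnd row c with hc'
        have hle : c' ≤ row.length := pvRunEnd_le row c (by omega)
        have hmax := pvRunEnd_max row c (by omega)
        have hlm : c = 0 ∨ PySem.Chars.isdigit (row.getD (c - 1) ' ') = false := by
          by_cases h0 : c = 0
          · exact Or.inl h0
          right
          by_contra hnd
          have hnd' : PySem.Chars.isdigit (row.getD (c - 1) ' ') = true := by
            revert hnd; cases (PySem.Chars.isdigit (row.getD (c - 1) ' ')) <;> simp
          obtain ⟨hr, hl2, hr2⟩ := ext_isRun row (c - 1) (by omega) hnd'
          have hEc := hpre _ _ hr (by omega)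
          obtain ⟨_, _, _, _, hrm⟩ := hr
          have hE : pvExtRight row (c - 1) = c - 1 := by omega
          rw [hE] at hrm
          rcases hrm with h1 | h1
          · omega
          · have h2 : c - 1 + 1 = c := by omega
            rw [h2, hd] at h1
            exact Bool.noConfusion h1
        have hrun : IsRun row c (c' - 1) := by
          refine ⟨by omega, by omega, ?_, hlm, ?_⟩
          · intro k h1 h2; exact pvRunEnd_digits row c k h1 (by omega)
          · have h2 : c' - 1 + 1 = c' := by omega
            rw [h2]; exact hmax
        have hpre' : ∀ S E, IsRun row S E → S < c' → E < c' := by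
          intro S E hR hS
          rcases Nat.lt_or_ge S c with h1 | h1
          · have := hpre S E hR h1; omega
          · obtain ⟨h2, h3⟩ := run_unique hR hrun (Nat.le_refl S) hR.1 h1 (by omega)
            omega
        have hrec := ih c' (by omega) hpre'
        constructor
        · intro hm
          rcases List.mem_cons.mp hm with heq | hm'
          · injection heq with hs h23
            injection h23 with he hv
            subst hs; subst he; subst hv
            refine ⟨hrun, le_rfl, ?_⟩
            rw [show ((c' - 1 : Nat) : Int) + 1 = (c' : Int) from by omega]
          · obtain ⟨hR, hcs, hv⟩ := (hrec s e v).mp hm'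
            exact ⟨hR, by omega, hv⟩
        · rintro ⟨hR, hcs, hv⟩
          rcases Nat.lt_or_ge s c' with h1 | h1
          · obtain ⟨h2, h3⟩ := run_unique hR hrun (Nat.le_refl s) hR.1 hcs (by omega)
            subst h2; subst h3
            apply List.mem_cons.mpr
            left
            rw [hv]
            rw [show ((c' - 1 : Nat) : Int) + 1 = (c' : Int) from by omega]
          · exact List.mem_cons.mpr (Or.inr ((hrec s e v).mpr ⟨hR, h1, hv⟩))
      · rw [pvScanRuns, dif_pos hc, dif_neg hd]
        have hpre' : ∀ S E, IsRun row S E → S < c + 1 → E < c + 1 := by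
          intro S E hR hS
          rcases Nat.lt_or_ge S c with h1 | h1
          · have := hpre S E hR h1; omega
          · have hSc : S = c := by omega
            subst hSc
            exact absurd (hR.2.2.1 _ le_rfl hR.1) hd
        rw [ih (c + 1) (by omega) hpre' s e v]
        constructor
        · rintro ⟨hR, hcs, hv⟩; exact ⟨hR, by omega, hv⟩
        · rintro ⟨hR, hcs, hv⟩
          refine ⟨hR, ?_, hv⟩
          rcases Nat.eq_or_lt_of_le hcs with h1 | h1
          · exfalso
            subst h1
            exact absurd (hR.2.2.1 _ le_rfl hR.1) hd
          · omega
    · exact scan_out row c hc s e v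

-- generic conditional dedup-append step
def pvIns (l : List Int) (o : Option Int) : List Int :=
  match o with
  | none => l
  | some v => if v ∈ l then l else l ++ [v]

theorem mem_pvIns (l : List Int) (o : Option Int) (a : Int) :
    a ∈ pvIns l o ↔ a ∈ l ∨ o = some a := by
  cases o with
  | none => simp [pvIns]
  | some v =>
    simp only [pvIns, Option.some.injEq]
    split_ifs with h
    · constructor
      · exact Or.inl
      · rintro (h1 | h1)
        · exact h1
        · rwa [h1] at h
    · simp only [List.mem_append, List.mem_singleton]
      constructor
      · rintro (h1 | h1)
        · exact Or.inl h1
        · exact Or.inr h1.symm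
      · rintro (h1 | h1)
        · exact Or.inl h1
        · exact Or.inr h1.symm

theorem nodup_pvIns (l : List Int) (o : Option Int) (h : l.Nodup) : (pvIns l o).Nodup := by
  cases o with
  | none => exact h
  | some v =>
    simp only [pvIns]
    split_ifs with hv
    · exact h
    · exact List.Nodup.append h (List.nodup_singleton v) (by simpa using hv)

theorem mem_foldl_pvIns {α : Type} (cand : α → Option Int) (xs : List α) (acc : List Int) (a : Int) :
    a ∈ xs.foldl (fun l x => pvIns l (cand x)) acc ↔ a ∈ acc ∨ ∃ x ∈ xs, cand x = some a := by
  induction xs generalizing acc with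
  | nil => simp
  | cons x xs ih =>
    simp only [List.foldl_cons, ih (pvIns acc (cand x)), mem_pvIns, List.mem_cons]
    constructor
    · rintro ((h1 | h1) | h1)
      · exact Or.inl h1
      · exact Or.inr ⟨x, Or.inl rfl, h1⟩
      · obtain ⟨y, hy, hc⟩ := h1
        exact Or.inr ⟨y, Or.inr hy, hc⟩
    · rintro (h1 | ⟨y, (rfl | hy), hc⟩)
      · exact Or.inl (Or.inl h1)
      · exact Or.inl (Or.inr hc)
      · exact Or.inr ⟨y, hy, hc⟩

theorem nodup_foldl_pvIns {α : Type} (cand : α → Option Int) (xs : List α) (acc : List Int)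
    (h : acc.Nodup) : (xs.foldl (fun l x => pvIns l (cand x)) acc).Nodup := by
  induction xs generalizing acc with
  | nil => exact h
  | cons x xs ih => exact ih _ (nodup_pvIns acc (cand x) h)

theorem mem_foldl_pvIns2 {α β : Type} (inner : α → List β) (cand : α → β → Option Int)
    (xs : List α) (acc : List Int) (a : Int) :
    a ∈ xs.foldl (fun l x => (inner x).foldl (fun l y => pvIns l (cand x y)) l) acc ↔
      a ∈ acc ∨ ∃ x ∈ xs, ∃ y ∈ inner x, cand x y = some a := by
  induction xs generalizing acc with
  | nil => simp
  | cons x xs ih =>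
    simp only [List.foldl_cons, ih, mem_foldl_pvIns, List.mem_cons]
    constructor
    · rintro (h1 | h1)
      · rcases h1 with h1 | ⟨y, hy, hc⟩
        · exact Or.inl h1
        · exact Or.inr ⟨x, Or.inl rfl, y, hy, hc⟩
      · obtain ⟨z, hz, y, hy, hc⟩ := h1
        exact Or.inr ⟨z, Or.inr hz, y, hy, hc⟩
    · rintro (h1 | ⟨z, (rfl | hz), y, hy, hc⟩)
      · exact Or.inl (Or.inl h1)
      · exact Or.inl (Or.inr ⟨y, hy, hc⟩)
      · exact Or.inr ⟨z, hz, y, hy, hc⟩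

theorem nodup_foldl_pvIns2 {α β : Type} (inner : α → List β) (cand : α → β → Option Int)
    (xs : List α) (acc : List Int) (h : acc.Nodup) :
    (xs.foldl (fun l x => (inner x).foldl (fun l y => pvIns l (cand x y)) l) acc).Nodup := by
  induction xs generalizing acc with
  | nil => exact h
  | cons x xs ih => exact ih _ (nodup_foldl_pvIns _ _ _ h)

theorem pvGetD_nonneg {α : Type} (xs : List α) (i : Int) (d : α) (h : 0 ≤ i) :
    PySem.List.pyGetD xs i d = xs.getD i.toNat d := by
  conv_lhs => rw [show i = ((i.toNat : Nat) : Int) from by omega]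
  rw [PySem.List.pyGetD_natCast]

-- A's inner 3x3 candidate, as one Option-valued function
def candA (g : List (List Char)) (x y dx dy : Int) : Option Int :=
  if 0 ≤ x + dx ∧ x + dx < (g.length : Int) then
    if dx = 0 ∧ dy = 0 then none
    else
      if 0 ≤ y + dy ∧ y + dy < ((PySem.List.pyGetD g (x + dx) []).length : Int) ∧
          PySem.Chars.isdigit (PySem.List.pyGetD (PySem.List.pyGetD g (x + dx) []) (y + dy) ' ') then
        some (pvIntOf (PySem.List.slice (PySem.List.pyGetD g (x + dx) [])
          (some (pvExtLeft (PySem.List.pyGetD g (x + dx) []) (y + dy).toNat : Int))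
          (some ((pvExtRight (PySem.List.pyGetD g (x + dx) []) (y + dy).toNat : Int) + 1))))
      else none
  else none

theorem findAdj_eq (g : List (List Char)) (x y : Int) :
    pvFindAdjacent g x y =
      ([-1, 0, 1] : List Int).foldl (fun l dx =>
        ([-1, 0, 1] : List Int).foldl (fun l dy => pvIns l (candA g x y dx dy)) l) [] := by
  simp only [pvFindAdjacent]
  apply PySem.List.foldl_congr_mem
  intro acc dx _
  by_cases hx : 0 ≤ x + dx ∧ x + dx < (g.length : Int)
  · rw [if_pos hx]
    apply PySem.List.foldl_congr_mem
    intro acc2 dy _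
    rw [candA, if_pos hx]
    by_cases hz : dx = 0 ∧ dy = 0
    · rw [if_pos hz, if_pos hz]; rfl
    · rw [if_neg hz, if_neg hz]
      by_cases hg : 0 ≤ y + dy ∧ y + dy < ((PySem.List.pyGetD g (x + dx) []).length : Int) ∧
          PySem.Chars.isdigit (PySem.List.pyGetD (PySem.List.pyGetD g (x + dx) []) (y + dy) ' ')
      · rw [if_pos hg, if_pos hg]; rfl
      · rw [if_neg hg, if_neg hg]; rfl
  · rw [if_neg hx]
    have hfn : (fun (l : List Int) (dy : Int) => pvIns l (candA g x y dx dy)) =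
        fun l _ => l := by
      funext l dy
      rw [candA, if_neg hx]; rfl
    rw [hfn]
    simp

-- B's candidate for one parsed run near the star in column j
def candB (j _r : Int) (sev : Nat × Nat × Int) : Option Int :=
  if (sev.1 : Int) ≤ j + 1 ∧ j - 1 ≤ (sev.2.1 : Int) then some sev.2.2 else none

theorem valsB_eq (runs : List (List (Nat × Nat × Int))) (glen i j : Int) :
    (PySem.List.pyRange (max (i - 1) 0) (min (i + 2) glen) 1).foldl
      (fun vals r => (PySem.List.pyGetD runs r []).foldl (fun vals sev =>
        if (sev.1 : Int) ≤ j + 1 ∧ j - 1 ≤ (sev.2.1 : Int) ∧ sev.2.2 ∉ vals then vals ++ [sev.2.2]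
        else vals) vals) [] =
    (PySem.List.pyRange (max (i - 1) 0) (min (i + 2) glen) 1).foldl
      (fun l r => (PySem.List.pyGetD runs r []).foldl (fun l sev => pvIns l (candB j r sev)) l) [] := by
  apply PySem.List.foldl_congr_mem
  intro acc r _
  apply PySem.List.foldl_congr_mem
  intro acc2 sev _
  rw [candB]
  by_cases hc : (sev.1 : Int) ≤ j + 1 ∧ j - 1 ≤ (sev.2.1 : Int)
  · rw [if_pos hc]
    by_cases hm : sev.2.2 ∈ acc2
    · rw [if_neg (by tauto)]
      simp [pvIns, hm]
    · rw [if_pos ⟨hc.1, hc.2, hm⟩]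
      simp [pvIns, hm]
  · rw [if_neg (by tauto), if_neg hc]; rfl

theorem ext_payload (row : List Char) (S E k : Nat) (hR : IsRun row S E)
    (h1 : S ≤ k) (h2 : k ≤ E) : pvExtLeft row k = S ∧ pvExtRight row k = E := by
  have hk : k < row.length := by have := hR.2.1; omega
  have hd := hR.2.2.1 k h1 h2
  obtain ⟨hr, ha, hb⟩ := ext_isRun row k hk hd
  exact run_unique hr hR ha hb h1 h2

theorem scan_nil : pvScanRuns [] 0 = [] := by
  rw [pvScanRuns]
  simp

theorem runs_getD (g : List (List Char)) (r : Int) :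
    PySem.List.pyGetD (g.map (fun row => pvScanRuns row 0)) r [] =
      pvScanRuns (PySem.List.pyGetD g r []) 0 := by
  rw [show ([] : List (Nat × Nat × Int)) = pvScanRuns [] 0 from scan_nil.symm,
    PySem.List.pyGetD_map]

-- the per-star equivalence: A's deduped neighbour values are a permutation of
-- B's deduped values of runs intersecting the 3x3 window
theorem star_perm (g : List (List Char)) (i j : Int)
    (hi0 : 0 ≤ i) (hi1 : i < (g.length : Int)) (hj0 : 0 ≤ j)
    (hj1 : j < ((PySem.List.pyGetD g i []).length : Int))
    (hstar : PySem.List.pyGetD (PySem.List.pyGetD g i []) j ' ' = '*') :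
    (pvFindAdjacent g i j).Perm
      ((PySem.List.pyRange (max (i - 1) 0) (min (i + 2) (g.length : Int)) 1).foldl
        (fun l r => (PySem.List.pyGetD (g.map (fun row => pvScanRuns row 0)) r []).foldl
          (fun l sev => pvIns l (candB j r sev)) l) []) := by
  rw [findAdj_eq]
  rw [List.perm_ext_iff_of_nodup
    (nodup_foldl_pvIns2 (fun _ => ([-1, 0, 1] : List Int)) (candA g i j) _ _ List.nodup_nil)
    (nodup_foldl_pvIns2 (fun r => PySem.List.pyGetD (g.map (fun row => pvScanRuns row 0)) r [])
      (candB j) _ _ List.nodup_nil)]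
  intro a
  rw [mem_foldl_pvIns2 (fun _ => ([-1, 0, 1] : List Int)) (candA g i j),
    mem_foldl_pvIns2 (fun r => PySem.List.pyGetD (g.map (fun row => pvScanRuns row 0)) r [])
      (candB j)]
  simp only [List.not_mem_nil, false_or]
  constructor
  · rintro ⟨dx, hdx, dy, hdy, hc⟩
    rw [candA] at hc
    split_ifs at hc with h1 h2 h3
    · obtain ⟨hb0, hb1, hdig⟩ := h3
      have hdxm : dx = -1 ∨ dx = 0 ∨ dx = 1 := by simpa using hdx
      have hdym : dy = -1 ∨ dy = 0 ∨ dy = 1 := by simpa using hdy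
      set rowx := PySem.List.pyGetD g (i + dx) [] with hrowx
      have hdigN : PySem.Chars.isdigit (rowx.getD (j + dy).toNat ' ') = true := by
        rwa [pvGetD_nonneg rowx (j + dy) ' ' hb0] at hdig
      have hnyl : (j + dy).toNat < rowx.length := by omega
      obtain ⟨hr, ha, hb⟩ := ext_isRun rowx (j + dy).toNat hnyl hdigN
      refine ⟨i + dx, ?_, (pvExtLeft rowx (j + dy).toNat, pvExtRight rowx (j + dy).toNat,
        pvIntOf (PySem.List.slice rowx (some (pvExtLeft rowx (j + dy).toNat : Int))
          (some ((pvExtRight rowx (j + dy).toNat : Int) + 1)))), ?_, ?_⟩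
      · rw [PySem.List.mem_pyRange_one]
        omega
      · rw [runs_getD]
        rw [scan_mem rowx 0 (by intro s e _ hs; omega)]
        exact ⟨hr, Nat.zero_le _, rfl⟩
      · rw [candB]
        dsimp only
        rw [if_pos (by constructor <;> omega)]
        exact hc
  · rintro ⟨r, hr, ⟨S, E, v⟩, hsev, hc⟩
    rw [PySem.List.mem_pyRange_one] at hr
    rw [runs_getD] at hsev
    rw [candB] at hc
    dsimp only at hc
    split_ifs at hc with hcond
    obtain ⟨hR, -, hval⟩ := (scan_mem (PySem.List.pyGetD g r []) 0 (by intro s e _ hs; omega)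
      S E v).mp hsev
    set rowr := PySem.List.pyGetD g r [] with hrowr
    have hElen : E < rowr.length := hR.2.1
    have hSE : S ≤ E := hR.1
    have ha : v = a := by injection hc
    have key : ∀ dy : Int, ¬(r - i = 0 ∧ dy = 0) → 0 ≤ j + dy →
        S ≤ (j + dy).toNat → (j + dy).toNat ≤ E → candA g i j (r - i) dy = some a := by
      intro dy hnz hpos hS hE
      rw [candA]
      rw [show i + (r - i) = r from by omega]
      rw [← hrowr]
      rw [if_pos (show (0:Int) ≤ r ∧ r < (g.length : Int) from by constructor <;> omega)]
      rw [if_neg hnz]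
      have hdig : PySem.Chars.isdigit (PySem.List.pyGetD rowr (j + dy) ' ') = true := by
        rw [pvGetD_nonneg _ _ _ hpos]
        exact hR.2.2.1 _ hS hE
      rw [if_pos ⟨hpos, by omega, hdig⟩]
      obtain ⟨hL, hRt⟩ := ext_payload rowr S E (j + dy).toNat hR hS hE
      rw [hL, hRt, ← hval, ha]
    rcases Int.lt_or_le (E : Int) j with hEj | hEj
    · exact ⟨r - i, by simp; omega, -1, by simp,
        key (-1) (by rintro ⟨-, h⟩; exact absurd h (by decide)) (by omega) (by omega) (by omega)⟩
    · rcases Int.lt_or_le j (S : Int) with hSj | hSj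
      · exact ⟨r - i, by simp; omega, 1, by simp,
          key 1 (by rintro ⟨-, h⟩; exact absurd h (by decide)) (by omega) (by omega) (by omega)⟩
      · have hri : ¬ r = i := by
          intro hri
          subst hri
          have hd := hR.2.2.1 j.toNat (by omega) (by omega)
          rw [pvGetD_nonneg _ _ _ hj0] at hstar
          rw [hrowr] at hd
          rw [hstar] at hd
          exact absurd hd (by decide)
        exact ⟨r - i, by simp; omega, 0, by simp,
          key 0 (by rintro ⟨h, -⟩; exact hri (by omega)) (by omega) (by omega) (by omega)⟩

theorem perm_pair (l l' : List Int) (hp : l.Perm l') (h2 : l.length = 2) :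
    PySem.List.pyGetD l 0 0 * PySem.List.pyGetD l 1 0 =
      PySem.List.pyGetD l' 0 0 * PySem.List.pyGetD l' 1 0 := by
  match l, l', h2, hp.length_eq with
  | [a, b], [c, d], _, _ =>
    have hac : a = c ∨ a = d := by
      have h := hp.mem_iff.mp (show a ∈ [a, b] by simp)
      simpa using h
    rcases hac with hac | hac
    · subst hac
      have hbd : b = d := by
        have h1 := (List.perm_cons a).mp hp
        simpa using h1
      subst hbd
      rfl
    · subst hac
      have hbc : b = c := by
        have h1 := (List.perm_cons a).mp (hp.trans (List.Perm.swap a c []))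
        simpa using h1
      subst hbc
      show a * b = b * a
      exact mul_comm a b

-- ===== VERDICT (by name: the statement is the Claim_ definition above) =====
theorem calculate_gear_ratios_refined_spec : Claim_equal_calculate_gear_ratios_refined := by
  intro grid _
  unfold Spec_calculate_gear_ratios_refined
  simp only [calculate_gear_ratios_refined, calculate_gear_ratios_refined_alt]
  apply PySem.List.foldl_congr_mem
  intro total i hi
  apply PySem.List.foldl_congr_mem
  intro total2 j hj
  rw [PySem.List.mem_pyRange_one] at hi hj
  by_cases hstar :
      PySem.List.pyGetD (PySem.List.pyGetD (grid.map String.toList) i []) j ' ' = '*'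
  · rw [if_pos hstar, if_pos hstar]
    rw [valsB_eq]
    have hperm := star_perm (grid.map String.toList) i j hi.1 hi.2 hj.1 hj.2 hstar
    have hlen := hperm.length_eq
    by_cases h2 : (pvFindAdjacent (grid.map String.toList) i j).length = 2
    · rw [if_pos h2, if_pos (by omega)]
      rw [perm_pair _ _ hperm h2]
    · rw [if_neg h2, if_neg (by omega)]
  · rw [if_neg hstar, if_neg hstar]
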